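-- pv_equiv track=rewrite | github.com/taylor-swift-13/SAM2INV | loop_factory/batch_pipeline.py | build_even_core_plan
-- ===== SOURCE A (Python) =====
-- from typing import Dict, List, Optional, Set, Tuple
--
-- def build_even_core_plan(total_attempts: int, cores: List[str]) -> List[Optional[str]]:
--     if total_attempts <= 0:
--         return []
--     if not cores:
--         return [None] * total_attempts
--     k = len(cores)
--     base = total_attempts // k
--     rem = total_attempts % k
--     plan: List[Optional[str]] = []
--     for i, c in enumerate(cores):
--         quota = base + (1 if i < rem else 0)
--         plan.extend([c] * quota)
--     return plan
-- ===== SOURCE B (Python) =====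
-- from typing import List, Optional
--
-- def build_even_core_plan(total_attempts: int, cores: List[str]) -> List[Optional[str]]:
--     # Incremental fair division: each core takes the ceiling of what is left
--     # divided by the number of cores still unserved.
--     if total_attempts <= 0:
--         return []
--     if not cores:
--         return [None] * total_attempts
--     plan: List[Optional[str]] = []
--     remaining = total_attempts
--     left = len(cores)
--     for c in cores:
--         q = -(-remaining // left)
--         plan += [c] * q
--         remaining -= q
--         left -= 1
--     return plan
-- ===== Notes on version B (the rewrite author's own statement) =====
-- stated objective: alternative
-- what changed: A precomputes base=total//k and rem=total%k and gives core i a quota by comparing its index to rem; B instead performs incremental fair division, each core taking ceil(remaining/cores_left) from a running remainder, so no index/remainder comparison exists.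
import Mathlib
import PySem

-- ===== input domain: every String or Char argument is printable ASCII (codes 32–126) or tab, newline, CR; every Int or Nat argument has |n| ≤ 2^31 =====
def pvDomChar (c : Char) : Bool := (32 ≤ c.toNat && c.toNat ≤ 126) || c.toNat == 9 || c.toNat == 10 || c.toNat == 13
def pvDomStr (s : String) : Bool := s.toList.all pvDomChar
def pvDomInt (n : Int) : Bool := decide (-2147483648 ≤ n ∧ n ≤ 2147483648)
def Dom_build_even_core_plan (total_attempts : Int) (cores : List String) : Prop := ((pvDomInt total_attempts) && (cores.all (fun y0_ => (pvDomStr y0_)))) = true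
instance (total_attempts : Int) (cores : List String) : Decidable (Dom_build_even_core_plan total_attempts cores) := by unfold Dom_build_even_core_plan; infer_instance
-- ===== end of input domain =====

-- B replaces A's precomputed base/remainder block quotas by an incremental
-- fair division (each core takes ceil(remaining/left)); objective: alternative decomposition.

-- ===== PORT A =====
def build_even_core_plan (total_attempts : Int) (cores : List String) : List (Option String) :=
  if total_attempts ≤ 0 then []
  else if cores = [] then List.replicate total_attempts.toNat none
  else
    let k : Int := cores.length
    let base := PySem.Int.floordiv total_attempts k
    let rem := PySem.Int.mod total_attempts k
    (PySem.List.enumerate cores 0).foldl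
      (fun plan ic =>
        plan ++ List.replicate (base + (if ic.1 < rem then 1 else 0)).toNat (some ic.2)) []

-- ===== PORT B =====
def build_even_core_plan_alt (total_attempts : Int) (cores : List String) : List (Option String) :=
  if total_attempts ≤ 0 then []
  else if cores = [] then List.replicate total_attempts.toNat none
  else
    (cores.foldl
      (fun (st : List (Option String) × Int × Int) c =>
        let q := -(PySem.Int.floordiv (-st.2.1) st.2.2)
        (st.1 ++ List.replicate q.toNat (some c), st.2.1 - q, st.2.2 - 1))
      ([], total_attempts, (cores.length : Int))).1

-- ===== PRECONDITION & SPEC =====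
def Spec_build_even_core_plan (total_attempts : Int) (cores : List String) (out : List (Option String)) : Prop := out = build_even_core_plan_alt total_attempts cores
instance (total_attempts : Int) (cores : List String) (out : List (Option String)) : Decidable (Spec_build_even_core_plan total_attempts cores out) := by unfold Spec_build_even_core_plan; infer_instance

-- ===== CLAIM (what is proved, stated in full; the proofs are below) =====
def Claim_equal_build_even_core_plan : Prop := ∀ (total_attempts : Int) (cores : List String), Dom_build_even_core_plan total_attempts cores → Spec_build_even_core_plan total_attempts cores (build_even_core_plan total_attempts cores)

-- ===== LEMMAS AND PROOFS =====

-- recursive description of B's loop (proof helper)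
def pvBrec : Int → List String → List (Option String)
  | _, [] => []
  | t, c :: cs =>
    let q := -(PySem.Int.floordiv (-t) ((cs.length : Int) + 1))
    List.replicate q.toNat (some c) ++ pvBrec (t - q) cs

-- B's foldl unrolls to pvBrec
theorem pvB_foldl_eq (cs : List String) : ∀ (acc : List (Option String)) (t : Int),
    (cs.foldl
      (fun (st : List (Option String) × Int × Int) c =>
        let q := -(PySem.Int.floordiv (-st.2.1) st.2.2)
        (st.1 ++ List.replicate q.toNat (some c), st.2.1 - q, st.2.2 - 1))
      (acc, t, (cs.length : Int))).1 = acc ++ pvBrec t cs := by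
  induction cs with
  | nil => intro acc t; simp [pvBrec]
  | cons c cs ih =>
    intro acc t
    simp only [List.foldl_cons, pvBrec]
    rw [show ((c :: cs).length : Int) = (cs.length : Int) + 1 by simp]
    have := ih (acc ++ List.replicate (-(PySem.Int.floordiv (-t) ((cs.length : Int) + 1))).toNat (some c)) (t - -(PySem.Int.floordiv (-t) ((cs.length : Int) + 1)))
    simpa [List.append_assoc] using this

-- ceiling division: -((-t) // k) for 0 < k
theorem pvCeil_eq (t k : Int) (hk : 0 < k) :
    -(PySem.Int.floordiv (-t) k) = PySem.Int.floordiv t k + (if 0 < PySem.Int.mod t k then 1 else 0) := by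
  rw [PySem.Int.neg_floordiv_neg_eq_iff_of_pos hk]
  rw [PySem.Int.floordiv_eq_ediv_of_pos hk, PySem.Int.mod_eq_emod_of_pos hk]
  have h1 := Int.ediv_add_emod t k
  have h2 := Int.emod_nonneg t (by omega : k ≠ 0)
  have h3 := Int.emod_lt_of_pos t hk
  split_ifs with h <;> constructor <;> nlinarith [Int.ediv_add_emod t k]

-- the next base/rem after the first core takes its ceiling share
theorem pvNext_div (t k' : Int) (hk' : 0 < k') (ht : 0 ≤ t) :
    PySem.Int.floordiv (t - -(PySem.Int.floordiv (-t) (k' + 1))) k' = PySem.Int.floordiv t (k' + 1) ∧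
    PySem.Int.mod (t - -(PySem.Int.floordiv (-t) (k' + 1))) k' =
      PySem.Int.mod t (k' + 1) - (if 0 < PySem.Int.mod t (k' + 1) then 1 else 0) := by
  have hk : (0:Int) < k' + 1 := by omega
  rw [pvCeil_eq t (k' + 1) hk]
  rw [PySem.Int.floordiv_eq_ediv_of_pos hk, PySem.Int.mod_eq_emod_of_pos hk,
      PySem.Int.floordiv_eq_ediv_of_pos hk', PySem.Int.mod_eq_emod_of_pos hk']
  have h1 := Int.ediv_add_emod t (k' + 1)
  have h2 := Int.emod_nonneg t (by omega : k' + 1 ≠ 0)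
  have h3 := Int.emod_lt_of_pos t hk
  have hb : 0 ≤ t / (k' + 1) := Int.ediv_nonneg ht (by omega)
  set b := t / (k' + 1) with hbdef
  set r := t % (k' + 1) with hrdef
  split_ifs with h
  · -- r > 0 : t' = (r - 1) + b * k'
    have key : t - (b + 1) = (r - 1) + b * k' := by nlinarith
    constructor
    · rw [key, Int.add_mul_ediv_right _ _ (by omega : k' ≠ 0)]
      rw [Int.ediv_eq_zero_of_lt (by omega) (by omega)]; omega
    · rw [key, Int.add_mul_emod_self_right, Int.emod_eq_of_lt (by omega) (by omega)]
  · -- r = 0 : t' = b * k'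
    constructor
    · have : t - (b + 0) = b * k' := by nlinarith
      rw [this, Int.mul_ediv_cancel _ (by omega : k' ≠ 0)]
    · have : t - (b + 0) = b * k' := by nlinarith
      rw [this, Int.mul_emod_left]; omega

-- index-shift congruence for the per-core blocks
theorem pvFlatMap_congr (cs : List String) : ∀ (s s' : Int) (f g : Int → Int),
    (∀ j : Nat, f (s + j) = g (s' + j)) →
    (PySem.List.enumerate cs s).flatMap (fun ic => List.replicate (f ic.1).toNat (some ic.2)) =
      (PySem.List.enumerate cs s').flatMap (fun ic => List.replicate (g ic.1).toNat (some ic.2)) := by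
  induction cs with
  | nil => intro s s' f g h; simp [PySem.List.enumerate_nil]
  | cons c cs ih =>
    intro s s' f g h
    rw [PySem.List.enumerate_cons, PySem.List.enumerate_cons]
    simp only [List.flatMap_cons]
    have h0 : f s = g s' := by simpa using h 0
    rw [h0, ih (s + 1) (s' + 1) f g (fun j => by
      have := h (j + 1); push_cast at this
      convert this using 2 <;> ring)]

-- main bridge: A's flatMap form over enumerate equals pvBrec
theorem pvA_eq_Brec (cs : List String) : ∀ (t : Int), 0 ≤ t →
    (PySem.List.enumerate cs 0).flatMap (fun ic =>
      List.replicate (PySem.Int.floordiv t (cs.length : Int)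
        + (if ic.1 < PySem.Int.mod t (cs.length : Int) then 1 else 0)).toNat (some ic.2))
      = pvBrec t cs := by
  induction cs with
  | nil => intro t ht; simp [PySem.List.enumerate_nil, pvBrec]
  | cons c cs ih =>
    intro t ht
    have hk : (0 : Int) < ((c :: cs).length : Int) := by simp
    have hlen : ((c :: cs).length : Int) = (cs.length : Int) + 1 := by push_cast [List.length_cons]; ring
    set k : Int := ((c :: cs).length : Int) with hkdef
    set q : Int := -(PySem.Int.floordiv (-t) k) with hq
    have hqval : q = PySem.Int.floordiv t k + (if 0 < PySem.Int.mod t k then 1 else 0) :=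
      pvCeil_eq t k hk
    have hble : PySem.Int.floordiv t k + (if 0 < PySem.Int.mod t k then 1 else 0) ≤ t := by
      rw [PySem.Int.floordiv_eq_ediv_of_pos hk, PySem.Int.mod_eq_emod_of_pos hk]
      have h1 := Int.ediv_add_emod t k
      have h2 := Int.emod_nonneg t (by omega : k ≠ 0)
      have h3 := Int.emod_lt_of_pos t hk
      have hb : 0 ≤ t / k := Int.ediv_nonneg ht (by omega)
      split_ifs with h <;> nlinarith
    have ht' : 0 ≤ t - q := by omega
    rw [PySem.List.enumerate_cons]
    simp only [List.flatMap_cons]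
    have hhead : (PySem.Int.floordiv t k + (if (0 : Int) < PySem.Int.mod t k then 1 else 0)).toNat = q.toNat := by
      rw [hqval]
    rw [show pvBrec t (c :: cs) = List.replicate q.toNat (some c) ++ pvBrec (t - q) cs from by
      rw [pvBrec]; rw [← hlen, ← hq]]
    rw [hhead]
    congr 1
    cases cs with
    | nil => simp [PySem.List.enumerate_nil, pvBrec]
    | cons d ds =>
      have hk' : (0 : Int) < (((d :: ds) : List String).length : Int) := by simp
      have hnext := pvNext_div (t := t) (k' := ((d :: ds).length : Int)) hk' ht
      rw [hlen] at hq
      rw [← hq] at hnext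
      simp only [zero_add]
      rw [pvFlatMap_congr (d :: ds) 1 0
        (fun i => PySem.Int.floordiv t k + (if i < PySem.Int.mod t k then 1 else 0))
        (fun i => PySem.Int.floordiv (t - q) ((d :: ds).length : Int)
          + (if i < PySem.Int.mod (t - q) ((d :: ds).length : Int) then 1 else 0))
        ?_]
      · exact ih (t - q) ht'
      · intro j
        simp only
        rw [hnext.1, hnext.2, hlen]
        set B := PySem.Int.floordiv t (((d :: ds).length : Int) + 1) with hB
        set R := PySem.Int.mod t (((d :: ds).length : Int) + 1) with hR
        split_ifs <;> omega

-- ===== VERDICT (by name: the statement is the Claim_ definition above) =====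
theorem build_even_core_plan_spec : Claim_equal_build_even_core_plan := by
  intro t cores _
  unfold Spec_build_even_core_plan
  unfold build_even_core_plan build_even_core_plan_alt
  by_cases h0 : t ≤ 0
  · simp [h0]
  · cases cores with
    | nil => simp [h0]
    | cons c cs =>
      simp only [h0, if_neg, List.cons_ne_nil, not_false_iff]
      rw [pvB_foldl_eq (c :: cs) [] t]
      rw [PySem.List.foldl_append_eq_flatMap]
      rw [pvA_eq_Brec (c :: cs) t (by omega)]
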